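-- pv_equiv track=rewrite | github.com/giokepa/Sysgen-GLM-for-Indels | fundemental_classes/visualization/run_dependency_map.py | get_label_from_header
-- ===== SOURCE A (Python) =====
-- def get_label_from_header(header: str) -> str:
--     if "label=" not in header:
--         return "unknown"
--     # header might look like: seq0001|label=A_only|posAmotif=...
--     parts = header.split("|")
--     for p in parts:
--         if p.startswith("label="):
--             return p.split("=", 1)[1].strip()
--     return "unknown"
-- ===== SOURCE B (Python) =====
-- def get_label_from_header(header: str) -> str:
--     # Build a key -> value table from the '|'-delimited fields, keeping the
--     # FIRST occurrence of each key, then look the label up once.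
--     table = {}
--     for part in header.split("|"):
--         if "=" in part:
--             key, value = part.split("=", 1)
--             if key not in table:
--                 table[key] = value
--     return table["label"].strip() if "label" in table else "unknown"
-- ===== Notes on version B (the rewrite author's own statement) =====
-- stated objective: alternative
-- what changed: Replaces the substring pre-check plus scan-with-early-return over the parts by building a first-occurrence key->value dict from all 'k=v' fields and doing a single table lookup of 'label'.
import Mathlib
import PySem

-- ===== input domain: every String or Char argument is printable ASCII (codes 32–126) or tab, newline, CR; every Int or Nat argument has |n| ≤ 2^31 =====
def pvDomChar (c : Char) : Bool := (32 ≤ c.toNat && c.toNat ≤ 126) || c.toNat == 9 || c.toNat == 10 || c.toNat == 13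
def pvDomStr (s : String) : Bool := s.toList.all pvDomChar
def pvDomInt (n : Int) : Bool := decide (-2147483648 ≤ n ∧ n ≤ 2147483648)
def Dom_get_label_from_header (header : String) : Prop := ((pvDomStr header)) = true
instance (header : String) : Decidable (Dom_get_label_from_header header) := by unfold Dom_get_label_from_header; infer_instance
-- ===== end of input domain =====

-- B replaces A's scan-with-early-return over the '|'-parts by building a first-occurrence
-- key→value table from all 'k=v' fields and doing a single lookup of 'label' (alternative, same cost).

-- ===== PORT A =====
-- the loop 'for p in parts: if p.startswith("label="): return p.split("=", 1)[1].strip()'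
-- plus the trailing 'return "unknown"'; p.split("=", 1)[1] cannot raise, since in that
-- branch p starts with "label=", so the .getD defaults are never used


def pvScanA : List String → String
  | [] => "unknown"
  | p :: rest =>
    if PySem.Str.startswith p "label=" then
      PySem.Str.strip (((PySem.Str.splitMax? p "=" 1).getD []).getD 1 "")
    else pvScanA rest

-- header.split("|"): the separator is non-empty, so split? is always some

def get_label_from_header (header : String) : String :=
  if !(PySem.Str.isIn "label=" header) then "unknown"
  else pvScanA ((PySem.Str.split? header "|").getD [])

-- ===== PORT B =====
-- key, value = part.split("=", 1)

def pvKV (p : String) : String × String :=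
  let kv := (PySem.Str.splitMax? p "=" 1).getD []
  (kv.getD 0 "", kv.getD 1 "")

-- the body of B's for-loop: 'if "=" in part: key, value = …; if key not in table: table[key] = value'

def pvStep (d : PySem.Dict String String) (p : String) : PySem.Dict String String :=
  if PySem.Str.isIn "=" p then
    if d.contains (pvKV p).1 then d else d.insert (pvKV p).1 (pvKV p).2
  else d

def get_label_from_header_alt (header : String) : String :=
  let table := ((PySem.Str.split? header "|").getD []).foldl pvStep PySem.Dict.empty
  if table.contains "label" then PySem.Str.strip (table.getD "label" "") else "unknown"

-- ===== PRECONDITION & SPEC =====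
def Spec_get_label_from_header (header : String) (out : String) : Prop := out = get_label_from_header_alt header
instance (header : String) (out : String) : Decidable (Spec_get_label_from_header header out) := by unfold Spec_get_label_from_header; infer_instance

-- ===== CLAIM (what is proved, stated in full; the proofs are below) =====
def Claim_equal_get_label_from_header : Prop := ∀ (header : String), Dom_get_label_from_header header → Spec_get_label_from_header header (get_label_from_header header)

-- ===== LEMMAS AND PROOFS =====

theorem pvGo0 (fuel : Nat) (l : List Char) (acc : List (List Char)) :
    PySem.Chars.splitOnMax.go ['='] fuel 0 l [] acc = (l :: acc).reverse := by
  cases fuel with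
  | zero => simp [PySem.Chars.splitOnMax.go]
  | succ f => cases l <;> simp [PySem.Chars.splitOnMax.go]

theorem pvGo1 (l : List Char) : ∀ (fuel : Nat) (cur : List Char) (acc : List (List Char)),
    l.length < fuel →
    PySem.Chars.splitOnMax.go ['='] fuel 1 l cur acc =
      (if '=' ∈ l
       then ((l.dropWhile (fun c => !(c == '='))).drop 1) :: (cur.reverse ++ l.takeWhile (fun c => !(c == '='))) :: acc
       else (cur.reverse ++ l) :: acc).reverse := by
  induction l with
  | nil => intro fuel cur acc h
           cases fuel with
           | zero => omega
           | succ f => simp [PySem.Chars.splitOnMax.go]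
  | cons c rest ih =>
      intro fuel cur acc h
      cases fuel with
      | zero => omega
      | succ f =>
        by_cases hc : c = '='
        · subst hc
          simp [PySem.Chars.splitOnMax.go, List.isPrefixOf, pvGo0, List.dropWhile, List.takeWhile]
        · have hpre : (['='].isPrefixOf (c :: rest)) = false := by
            simp [List.isPrefixOf]; exact fun h' => hc h'.symm
          rw [show PySem.Chars.splitOnMax.go ['='] (f+1) 1 (c :: rest) cur acc
                = PySem.Chars.splitOnMax.go ['='] f 1 rest (c :: cur) acc from by
            simp [PySem.Chars.splitOnMax.go, hpre]]
          rw [ih f (c :: cur) acc (by simpa using Nat.lt_of_succ_lt_succ h)]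
          have hb : (c == '=') = false := by simp [hc]
          simp [List.dropWhile, List.takeWhile, hb, Ne.symm hc]

theorem pvSplitMax1 (s : List Char) :
    PySem.Chars.splitOnMax s ['='] 1 =
      if '=' ∈ s then [s.takeWhile (fun c => !(c == '=')), (s.dropWhile (fun c => !(c == '='))).drop 1]
      else [s] := by
  unfold PySem.Chars.splitOnMax
  rw [if_neg (by omega)]
  simp only [show (1 : Int).toNat = 1 from rfl]
  rw [pvGo1 s (s.length + 1) [] [] (by omega)]
  split <;> simp

theorem pvGoSplit (l : List Char) : ∀ (fuel : Nat) (cur : List Char) (acc : List (List Char)),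
    l.length < fuel →
    PySem.Chars.splitOn.go ['|'] fuel l cur acc =
      acc.reverse ++ (cur.reverse ++ l.takeWhile (fun c => !(c == '|'))) ::
        (if '|' ∈ l then PySem.Chars.splitOn ((l.dropWhile (fun c => !(c == '|'))).drop 1) ['|'] else []) := by
  induction l with
  | nil => intro fuel cur acc h
           cases fuel with
           | zero => omega
           | succ f => simp [PySem.Chars.splitOn.go]
  | cons c rest ih =>
      intro fuel cur acc h
      cases fuel with
      | zero => omega
      | succ f =>
        by_cases hc : c = '|'
        · subst hc
          rw [show PySem.Chars.splitOn.go ['|'] (f+1) ('|' :: rest) cur acc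
                = PySem.Chars.splitOn.go ['|'] f rest [] (cur.reverse :: acc) from by
            simp [PySem.Chars.splitOn.go, List.isPrefixOf]]
          rw [ih f [] (cur.reverse :: acc) (by simpa using Nat.lt_of_succ_lt_succ h)]
          have hexp : PySem.Chars.splitOn rest ['|'] =
              rest.takeWhile (fun c => !(c == '|')) ::
                (if '|' ∈ rest then PySem.Chars.splitOn ((rest.dropWhile (fun c => !(c == '|'))).drop 1) ['|'] else []) := by
            conv_lhs => rw [show PySem.Chars.splitOn rest ['|']
                = PySem.Chars.splitOn.go ['|'] (rest.length + 1) rest [] [] from rfl]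
            rw [ih (rest.length + 1) [] [] (by omega)]
            simp
          simp [List.dropWhile, List.takeWhile, hexp]
        · have hb : (c == '|') = false := by simp [hc]
          have hpre : (['|'].isPrefixOf (c :: rest)) = false := by
            simp [List.isPrefixOf]; exact fun h' => hc h'.symm
          rw [show PySem.Chars.splitOn.go ['|'] (f+1) (c :: rest) cur acc
                = PySem.Chars.splitOn.go ['|'] f rest (c :: cur) acc from by
            simp [PySem.Chars.splitOn.go, hpre]]
          rw [ih f (c :: cur) acc (by simpa using Nat.lt_of_succ_lt_succ h)]
          simp [List.dropWhile, List.takeWhile, hb, Ne.symm hc]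

theorem pvSplitOnEq (s : List Char) :
    PySem.Chars.splitOn s ['|'] =
      s.takeWhile (fun c => !(c == '|')) ::
        (if '|' ∈ s then PySem.Chars.splitOn ((s.dropWhile (fun c => !(c == '|'))).drop 1) ['|'] else []) := by
  conv_lhs => rw [show PySem.Chars.splitOn s ['|']
      = PySem.Chars.splitOn.go ['|'] (s.length + 1) s [] [] from rfl]
  rw [pvGoSplit s (s.length + 1) [] [] (by omega)]
  simp

theorem pvMemSplitOnInfix (n : Nat) : ∀ (s p : List Char), s.length = n →
    p ∈ PySem.Chars.splitOn s ['|'] → p <:+: s := by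
  induction n using Nat.strong_induction_on with
  | _ n ih =>
    intro s p hn hp
    rw [pvSplitOnEq s] at hp
    rcases List.mem_cons.mp hp with h | h
    · subst h; exact (List.takeWhile_prefix _).isInfix
    · by_cases hmem : '|' ∈ s
      · rw [if_pos hmem] at h
        have hdw : s.dropWhile (fun c => !(c == '|')) ≠ [] := by
          intro hnil
          have := List.takeWhile_append_dropWhile (p := fun c => !(c == '|')) (l := s)
          rw [hnil, List.append_nil] at this
          rw [← this] at hmem
          have := List.mem_takeWhile_imp hmem
          simp at this
        have hlt : ((s.dropWhile (fun c => !(c == '|'))).drop 1).length < n := by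
          have h1 : (s.dropWhile (fun c => !(c == '|'))).length ≤ s.length := List.length_dropWhile_le _ _
          have h2 : 0 < (s.dropWhile (fun c => !(c == '|'))).length := List.length_pos_of_ne_nil hdw
          simp; omega
        have := ih _ hlt _ p rfl h
        exact this.trans ((List.drop_suffix _ _).trans (List.dropWhile_suffix _)).isInfix
      · rw [if_neg hmem] at h; simp at h

theorem pvPrefixIff (s : List Char) :
    "label=".toList <+: s ↔ ('=' ∈ s ∧ s.takeWhile (fun c => !(c == '=')) = "label".toList) := by
  constructor
  · rintro ⟨t, ht⟩
    have : s = 'l' :: 'a' :: 'b' :: 'e' :: 'l' :: '=' :: t := by rw [← ht]; rfl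
    subst this
    refine ⟨by simp, ?_⟩
    simp [List.takeWhile]
  · rintro ⟨hmem, htw⟩
    have hsplit := List.takeWhile_append_dropWhile (p := fun c => !(c == '=')) (l := s)
    have hdw : s.dropWhile (fun c => !(c == '=')) ≠ [] := by
      intro hnil
      rw [hnil, List.append_nil] at hsplit
      rw [← hsplit] at hmem
      have := List.mem_takeWhile_imp hmem
      simp at this
    obtain ⟨c, t, hct⟩ := List.exists_cons_of_ne_nil hdw
    have hc : c = '=' := by
      have := List.head_dropWhile_not (p := fun c => !(c == '=')) hdw
      simp [hct] at this
      exact this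
    refine ⟨t, ?_⟩
    conv_rhs => rw [← hsplit]
    rw [htw, hct, hc]
    rfl

theorem pvKVfst (p : String) :
    (pvKV p).1 = String.ofList (if '=' ∈ p.toList then p.toList.takeWhile (fun c => !(c == '=')) else p.toList) := by
  simp only [pvKV, PySem.Str.splitMax?, PySem.Chars.splitMax?]
  rw [show ("=" : String).toList = ['='] from rfl, pvSplitMax1,
    if_neg (by simp : ¬(['='] : List Char).isEmpty = true)]
  split <;> simp

theorem pvIsInEq (p : String) : PySem.Str.isIn "=" p = true ↔ '=' ∈ p.toList := by
  rw [PySem.Str.isIn_iff_infix]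
  exact List.singleton_infix_iff '=' p.toList

theorem pvK (p : String) :
    PySem.Str.startswith p "label=" = (PySem.Str.isIn "=" p && ((pvKV p).1 == "label")) := by
  have hsw : PySem.Str.startswith p "label=" = true ↔ "label=".toList <+: p.toList := by
    simp [PySem.Str.startswith, PySem.Chars.startswith, List.isPrefixOf_iff_prefix]
  by_cases hin : '=' ∈ p.toList
  · by_cases heq : p.toList.takeWhile (fun c => !(c == '=')) = "label".toList
    · have h1 : PySem.Str.startswith p "label=" = true := hsw.mpr (pvPrefixIff _ |>.mpr ⟨hin, heq⟩)
      have h2 : (pvKV p).1 = "label" := by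
        rw [pvKVfst, if_pos hin, heq]; exact String.ofList_toList
      rw [h1, h2, (pvIsInEq p).mpr hin]
      simp
    · have h1 : PySem.Str.startswith p "label=" = false := by
        rw [Bool.eq_false_iff]
        intro hT
        exact heq ((pvPrefixIff _).mp (hsw.mp hT)).2
      have h2 : ((pvKV p).1 == "label") = false := by
        rw [beq_eq_false_iff_ne]
        intro hE
        apply heq
        have := congrArg String.toList hE
        rw [pvKVfst, if_pos hin] at hE
        have := congrArg String.toList hE
        simpa [String.toList_ofList] using this
      rw [h1, h2]
      simp
  · have h1 : PySem.Str.startswith p "label=" = false := by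
      rw [Bool.eq_false_iff]
      intro hT
      exact hin ((pvPrefixIff _).mp (hsw.mp hT)).1
    have h2 : PySem.Str.isIn "=" p = false := by
      rw [Bool.eq_false_iff]
      intro hT
      exact hin ((pvIsInEq p).mp hT)
    rw [h1, h2]
    simp

theorem pvL2 (parts : List String) : ∀ (d : PySem.Dict String String), d.contains "label" = true →
    (parts.foldl pvStep d).contains "label" = true ∧
      (parts.foldl pvStep d).getD "label" "" = d.getD "label" "" := by
  induction parts with
  | nil => intro d h; exact ⟨h, rfl⟩
  | cons p rest ih =>
    intro d h
    have hstep : (pvStep d p).contains "label" = true ∧ (pvStep d p).getD "label" "" = d.getD "label" "" := by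
      unfold pvStep
      by_cases hi : PySem.Str.isIn "=" p = true
      · rw [if_pos hi]
        by_cases hk : (pvKV p).1 = "label"
        · rw [hk, if_pos h]; exact ⟨h, rfl⟩
        · by_cases hc : d.contains (pvKV p).1 = true
          · rw [if_pos hc]; exact ⟨h, rfl⟩
          · rw [if_neg hc]
            constructor
            · rw [PySem.Dict.contains_insert, h]; simp
            · exact PySem.Dict.getD_insert_of_ne d _ _ (fun hE => hk hE.symm)
      · rw [if_neg hi]; exact ⟨h, rfl⟩
    have := ih (pvStep d p) hstep.1
    simp only [List.foldl_cons]
    exact ⟨this.1, this.2.trans hstep.2⟩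

theorem pvNoLabel (parts : List String) : ∀ (d : PySem.Dict String String),
    (∀ p ∈ parts, PySem.Str.startswith p "label=" = false) →
    (parts.foldl pvStep d).contains "label" = d.contains "label" := by
  induction parts with
  | nil => intro d _; rfl
  | cons p rest ih =>
    intro d hall
    have hp := hall p (by simp)
    rw [pvK] at hp
    have hstep : (pvStep d p).contains "label" = d.contains "label" := by
      unfold pvStep
      by_cases hi : PySem.Str.isIn "=" p = true
      · rw [if_pos hi]
        have hk : ((pvKV p).1 == "label") = false := by
          rw [hi] at hp; simpa using hp
        by_cases hc : d.contains (pvKV p).1 = true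
        · rw [if_pos hc]
        · rw [if_neg hc, PySem.Dict.contains_insert]
          have : ("label" == (pvKV p).1) = false := by
            rw [beq_eq_false_iff_ne] at hk ⊢; exact fun hE => hk hE.symm
          rw [this]; simp
      · rw [if_neg hi]
    simp only [List.foldl_cons]
    rw [ih (pvStep d p) (fun q hq => hall q (by simp [hq])), hstep]

theorem pvL1 (parts : List String) : ∀ (d : PySem.Dict String String), d.contains "label" = false →
    (if (parts.foldl pvStep d).contains "label"
     then PySem.Str.strip ((parts.foldl pvStep d).getD "label" "")
     else "unknown") = pvScanA parts := by
  induction parts with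
  | nil => intro d h; simp [pvScanA, h]
  | cons p rest ih =>
    intro d h
    simp only [List.foldl_cons, pvScanA]
    by_cases hsw : PySem.Str.startswith p "label=" = true
    · rw [if_pos hsw]
      rw [pvK] at hsw
      have hi : PySem.Str.isIn "=" p = true := by
        cases hI : PySem.Str.isIn "=" p <;> rw [hI] at hsw <;> simpa using hsw
      have hk : (pvKV p).1 = "label" := by
        rw [hi] at hsw; simpa [beq_iff_eq] using hsw
      have hstep : pvStep d p = d.insert "label" (pvKV p).2 := by
        unfold pvStep
        rw [if_pos hi, hk, if_neg (by rw [h]; simp)]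
      have hc1 : (pvStep d p).contains "label" = true := by
        rw [hstep, PySem.Dict.contains_insert]; simp
      have := pvL2 rest (pvStep d p) hc1
      rw [if_pos this.1, this.2, hstep, PySem.Dict.getD_insert_self]
      rfl
    · have hswf : PySem.Str.startswith p "label=" = false := by simpa using hsw
      conv_rhs => rw [if_neg (show ¬PySem.Str.startswith p "label=" = true by rw [hswf]; exact Bool.false_ne_true)]
      have hstep : (pvStep d p).contains "label" = false := by
        unfold pvStep
        rw [pvK] at hswf
        by_cases hi : PySem.Str.isIn "=" p = true
        · rw [if_pos hi]
          have hk : ((pvKV p).1 == "label") = false := by rw [hi] at hswf; simpa using hswf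
          by_cases hc : d.contains (pvKV p).1 = true
          · rw [if_pos hc]; exact h
          · rw [if_neg hc, PySem.Dict.contains_insert]
            have : ("label" == (pvKV p).1) = false := by
              rw [beq_eq_false_iff_ne] at hk ⊢; exact fun hE => hk hE.symm
            rw [this, h]; rfl
        · rw [if_neg hi]; exact h
      exact ih (pvStep d p) hstep

theorem pvPartsInfix (header p : String)
    (hp : p ∈ (PySem.Str.split? header "|").getD []) : p.toList <:+: header.toList := by
  simp only [PySem.Str.split?, PySem.Chars.split?,
    show ("|" : String).toList = ['|'] from rfl] at hp
  rw [if_neg (by simp : ¬(['|'] : List Char).isEmpty = true)] at hp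
  simp only [Option.map_some, Option.getD_some, List.mem_map] at hp
  obtain ⟨q, hq, hqp⟩ := hp
  have := pvMemSplitOnInfix header.toList.length header.toList q rfl hq
  rw [← hqp, String.toList_ofList]
  exact this

theorem pvEmptyContains : (PySem.Dict.empty : PySem.Dict String String).contains "label" = false := rfl

theorem pvMain (header : String) : get_label_from_header header = get_label_from_header_alt header := by
  unfold get_label_from_header get_label_from_header_alt
  by_cases hin : PySem.Str.isIn "label=" header = true
  · rw [if_neg (by rw [hin]; simp)]
    exact (pvL1 ((PySem.Str.split? header "|").getD []) PySem.Dict.empty pvEmptyContains).symm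
  · have hinf : PySem.Str.isIn "label=" header = false := by simpa using hin
    rw [if_pos (by rw [hinf]; rfl)]
    have hall : ∀ p ∈ (PySem.Str.split? header "|").getD [],
        PySem.Str.startswith p "label=" = false := by
      intro p hp
      rw [Bool.eq_false_iff]
      intro hT
      apply hin
      rw [PySem.Str.isIn_iff_infix]
      have h1 : ("label=" : String).toList <+: p.toList := by
        have : PySem.Str.startswith p "label=" = true ↔ "label=".toList <+: p.toList := by
          simp [PySem.Str.startswith, PySem.Chars.startswith, List.isPrefixOf_iff_prefix]
        exact this.mp hT
      exact h1.isInfix.trans (pvPartsInfix header p hp)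
    have := pvNoLabel ((PySem.Str.split? header "|").getD []) PySem.Dict.empty hall
    rw [pvEmptyContains] at this
    simp only [this]
    rfl

-- ===== VERDICT (by name: the statement is the Claim_ definition above) =====
theorem get_label_from_header_spec : Claim_equal_get_label_from_header := by
  intro header _
  unfold Spec_get_label_from_header
  exact pvMain header
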